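-- pv_equiv track=rewrite | github.com/sveneggimann/SNIP | Python_Files/SNIP_functions.py | removePumpsWhereNoNetwork
-- ===== SOURCE A (Python) =====
-- def removePumpsWhereNoNetwork(pumps, allNodesToDelet):
--     """
--     Remove pumps of list with nodes which are removed.
--
--     Input Arguments:
--     pumps              --    list with pumps
--     allNodesToDelet    --    Nodes which are removed
--
--     Output Arguments:
--     pumps              --    pump list with removed IDs
--     """
--     for i in allNodesToDelet:
--         position = 0
--         for e in pumps:
--             if e[0] == i:
--                 del pumps[position]
--                 break
--             position += 1
--     return pumps
-- ===== SOURCE B (Python) =====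
-- def removePumpsWhereNoNetwork(pumps, allNodesToDelet):
--     # Count deletions per node id once, then one filtering pass with a per-id budget.
--     # Like A, mutates `pumps` in place (pumps[:] = kept) and returns it.
--     budget = {}
--     for i in allNodesToDelet:
--         budget[i] = budget.get(i, 0) + 1
--     kept = []
--     for e in pumps:
--         k = e[0]
--         if budget.get(k, 0) > 0:
--             budget[k] = budget[k] - 1
--         else:
--             kept.append(e)
--     pumps[:] = kept
--     return pumps
-- ===== Notes on version B (the rewrite author's own statement) =====
-- stated objective: faster
-- what changed: Instead of scanning the pump list once per node id to delete (nested loops with del), B builds a per-id deletion counter in one pass over allNodesToDelet and then filters pumps in a single pass, dropping each pump while its id's budget lasts.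
-- outside the precondition, e.g. on removePumpsWhereNoNetwork([[1], []], [1]): A returns [[]], B raises IndexError; on removePumpsWhereNoNetwork([[]], []): A returns [[]], B raises IndexError
import Mathlib
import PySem

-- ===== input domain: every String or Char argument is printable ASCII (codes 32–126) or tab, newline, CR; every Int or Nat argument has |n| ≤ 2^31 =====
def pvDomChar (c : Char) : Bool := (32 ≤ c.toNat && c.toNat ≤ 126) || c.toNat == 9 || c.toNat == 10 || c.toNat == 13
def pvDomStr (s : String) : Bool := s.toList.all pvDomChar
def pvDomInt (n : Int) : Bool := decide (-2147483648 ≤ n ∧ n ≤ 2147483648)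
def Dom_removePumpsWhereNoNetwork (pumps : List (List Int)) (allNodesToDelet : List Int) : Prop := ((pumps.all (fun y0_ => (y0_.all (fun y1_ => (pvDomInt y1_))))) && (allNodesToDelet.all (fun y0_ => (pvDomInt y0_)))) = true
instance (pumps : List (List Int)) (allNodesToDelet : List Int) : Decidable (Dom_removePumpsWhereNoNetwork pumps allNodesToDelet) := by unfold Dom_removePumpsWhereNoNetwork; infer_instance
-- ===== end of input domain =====

-- B replaces A's per-id rescans (nested loops with del) by a deletion counter plus one filtering pass: asymptotically faster.
-- Both A and B mutate `pumps` in place; the equivalence proved here is about the return value.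


-- ===== PORT A =====
-- inner loop of A: scan pumps, delete the first e with e[0] == i, break.
-- e[0] is ported as pyGetD e 0 0; exact on Pre_ (all rows nonempty).
def pvDelOne (i : Int) : List (List Int) → List (List Int)
  | [] => []
  | e :: rest => if PySem.List.pyGetD e 0 0 = i then rest else e :: pvDelOne i rest

def removePumpsWhereNoNetwork (pumps : List (List Int)) (allNodesToDelet : List Int) : List (List Int) :=
  allNodesToDelet.foldl (fun ps i => pvDelOne i ps) pumps

-- ===== PORT B =====
def removePumpsWhereNoNetwork_alt (pumps : List (List Int)) (allNodesToDelet : List Int) : List (List Int) :=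
  let budget := allNodesToDelet.foldl (fun d i => d.insert i (d.getD i 0 + 1)) (PySem.Dict.empty : PySem.Dict Int Int)
  (pumps.foldl (fun (st : PySem.Dict Int Int × List (List Int)) e =>
      let k := PySem.List.pyGetD e 0 0
      if st.1.getD k 0 > 0 then (st.1.insert k (st.1.getD k 0 - 1), st.2)
      else (st.1, st.2 ++ [e])) (budget, [])).2

-- ===== PRECONDITION & SPEC =====
-- Pre_ excludes pump rows that are empty lists: on those, e[0] raises IndexError in Python —
-- A raises whenever its scan reaches such a row, and B always raises; where A happens to break
-- before reaching the empty row (or never scans), A returns but B raises, so those inputs are excluded too.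
def Pre_removePumpsWhereNoNetwork (pumps : List (List Int)) (allNodesToDelet : List Int) : Prop :=
  ∀ p ∈ pumps, p ≠ []
instance (pumps : List (List Int)) (allNodesToDelet : List Int) : Decidable (Pre_removePumpsWhereNoNetwork pumps allNodesToDelet) := by unfold Pre_removePumpsWhereNoNetwork; infer_instance
def pvWitness_removePumpsWhereNoNetwork : List (List Int) × List Int := ([[1, 10], [2, 20], [1, 30]], [1, 3, 1])

def Spec_removePumpsWhereNoNetwork (pumps : List (List Int)) (allNodesToDelet : List Int) (out : List (List Int)) : Prop := out = removePumpsWhereNoNetwork_alt pumps allNodesToDelet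
instance (pumps : List (List Int)) (allNodesToDelet : List Int) (out : List (List Int)) : Decidable (Spec_removePumpsWhereNoNetwork pumps allNodesToDelet out) := by unfold Spec_removePumpsWhereNoNetwork; infer_instance

-- ===== CLAIM (what is proved, stated in full; the proofs are below) =====
def Claim_equal_removePumpsWhereNoNetwork : Prop := ∀ (pumps : List (List Int)) (allNodesToDelet : List Int), Dom_removePumpsWhereNoNetwork pumps allNodesToDelet → Pre_removePumpsWhereNoNetwork pumps allNodesToDelet → Spec_removePumpsWhereNoNetwork pumps allNodesToDelet (removePumpsWhereNoNetwork pumps allNodesToDelet)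

-- ===== LEMMAS AND PROOFS =====

-- Functional abstraction of B's filtering pass: f is the remaining per-id budget.
def pvDelMulti : List (List Int) → (Int → Int) → List (List Int)
  | [], _ => []
  | e :: r, f =>
      let k := PySem.List.pyGetD e 0 0
      if f k > 0 then pvDelMulti r (fun x => if x = k then f k - 1 else f x)
      else e :: pvDelMulti r f

theorem pvDelMulti_congr (ps : List (List Int)) {f g : Int → Int} (h : ∀ x, f x = g x) :
    pvDelMulti ps f = pvDelMulti ps g := by
  have : f = g := funext h
  rw [this]

-- B's foldl over pumps computes pvDelMulti of the budget's lookup function.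
theorem pvAlt_foldl_eq (ps : List (List Int)) (d : PySem.Dict Int Int) (acc : List (List Int)) :
    (ps.foldl (fun (st : PySem.Dict Int Int × List (List Int)) e =>
      let k := PySem.List.pyGetD e 0 0
      if st.1.getD k 0 > 0 then (st.1.insert k (st.1.getD k 0 - 1), st.2)
      else (st.1, st.2 ++ [e])) (d, acc)).2 = acc ++ pvDelMulti ps (fun x => d.getD x 0) := by
  induction ps generalizing d acc with
  | nil => simp [pvDelMulti]
  | cons e r ih =>
    simp only [List.foldl_cons, pvDelMulti]
    split_ifs with h
    · rw [ih]
      congr 1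
      apply pvDelMulti_congr
      intro x
      rw [PySem.Dict.getD_insert]
    · rw [ih]
      simp

-- budget after the counting loop looks up to List.count.
theorem pvBudget_getD (dels : List Int) (k : Int) :
    ((dels.foldl (fun d i => d.insert i (d.getD i 0 + 1)) (PySem.Dict.empty : PySem.Dict Int Int)).getD k 0)
      = (dels.count k : Int) := by
  rw [PySem.Dict.getD_foldl_insert_add_one]
  simp

-- zero budget deletes nothing
theorem pvDelMulti_zero (ps : List (List Int)) {f : Int → Int} (h : ∀ x, f x ≤ 0) :
    pvDelMulti ps f = ps := by
  induction ps with
  | nil => rfl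
  | cons e r ih =>
    simp only [pvDelMulti]
    rw [if_neg (by have := h (PySem.List.pyGetD e 0 0); omega), ih]

-- one extra unit of budget at i = delete the first row keyed i first.
theorem pvDelOne_delMulti (i : Int) (ps : List (List Int)) (f : Int → Int) (hf : ∀ x, 0 ≤ f x) :
    pvDelMulti (pvDelOne i ps) f = pvDelMulti ps (fun x => if x = i then f x + 1 else f x) := by
  induction ps generalizing f with
  | nil => rfl
  | cons e r ih =>
    by_cases hk : PySem.List.pyGetD e 0 0 = i
    · have hpos : (0:Int) < f i + 1 := by have := hf i; omega
      simp only [pvDelOne, pvDelMulti, hk, if_pos rfl, gt_iff_lt, hpos, if_true]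
      apply pvDelMulti_congr
      intro x
      by_cases hx : x = i <;> simp [hx]
    · simp only [pvDelOne, pvDelMulti, if_neg hk]
      split_ifs with h
      · rw [ih _ (fun x => by by_cases hx : x = PySem.List.pyGetD e 0 0 <;> simp only [hx, if_pos rfl, if_neg] <;> first | omega | exact hf x | exact hx)]
        apply pvDelMulti_congr
        intro x
        by_cases hx : x = PySem.List.pyGetD e 0 0 <;> by_cases hxi : x = i <;>
          simp [hx, hxi, hk] <;> simp_all
      · rw [ih _ hf]

-- A's nested loops equal the budget-filter with the multiset count of the deletion list.
theorem pvA_eq_delMulti (dels : List Int) (ps : List (List Int)) :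
    dels.foldl (fun ps i => pvDelOne i ps) ps = pvDelMulti ps (fun x => (dels.count x : Int)) := by
  induction dels generalizing ps with
  | nil =>
    simp only [List.foldl_nil]
    rw [pvDelMulti_zero ps (by intro x; simp)]
  | cons i rest ih =>
    simp only [List.foldl_cons]
    rw [ih, pvDelOne_delMulti i ps _ (by intro x; positivity)]
    apply pvDelMulti_congr
    intro x
    by_cases hx : x = i
    · subst hx; simp [List.count_cons]
    · simp [List.count_cons]; omega

-- ===== VERDICT (by name: the statement is the Claim_ definition above) =====
theorem removePumpsWhereNoNetwork_spec : Claim_equal_removePumpsWhereNoNetwork := by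
  intro pumps dels _ _
  show removePumpsWhereNoNetwork pumps dels = removePumpsWhereNoNetwork_alt pumps dels
  unfold removePumpsWhereNoNetwork removePumpsWhereNoNetwork_alt
  rw [pvAlt_foldl_eq, pvA_eq_delMulti]
  simp only [List.nil_append]
  exact pvDelMulti_congr pumps (fun x => (pvBudget_getD dels x).symm)
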